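-- pv_equiv track=rewrite | github.com/mjukiewicz/The-Independence-of-an-Axiomatization-of-Discussive-Logic-D2-with-the-Left-Discussive-Conjunction | chapter 5.3 one-designated/source/base.py | check_main_conj_indx
-- ===== SOURCE A (Python) =====
-- conj=["^",">","v","="]
--
-- def check_main_conj_indx(elements_in_formula):
--     indx_list=[]
--     for item in elements_in_formula:
--         flag=False
--         for indx in range(len(item)):
--             if item[indx] in conj and item[:indx].count("(")-item[:indx].count(")")==0 and item[indx:].count("(")-item[indx:].count(")")==0:
--                 flag=True
--                 break
--         if flag: indx_list.append(indx)
--     return indx_list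
-- ===== SOURCE B (Python) =====
-- conj=["^",">","v","="]
--
-- def check_main_conj_indx(elements_in_formula):
--     indx_list = []
--     for item in elements_in_formula:
--         if '^' not in item and '>' not in item and 'v' not in item and '=' not in item:
--             continue  # no connective at all, nothing to find
--         if item.count("(") != item.count(")"):
--             continue  # no index can have both sides balanced
--         bal = 0
--         for i, ch in enumerate(item):
--             if bal == 0 and ch in conj:
--                 indx_list.append(i)
--                 break
--             if ch == "(":
--                 bal += 1
--             elif ch == ")":
--                 bal -= 1
--     return indx_list
-- ===== Notes on version B (the rewrite author's own statement) =====
-- stated objective: faster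
-- what changed: A re-slices and re-counts parentheses in item[:i] and item[i:] at every index (quadratic per string); B skips strings containing no connective via C-level substring tests, compares the total parenthesis counts once, and otherwise makes a single left-to-right pass keeping a running balance, stopping at the first connective seen at balance zero.
import Mathlib
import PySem

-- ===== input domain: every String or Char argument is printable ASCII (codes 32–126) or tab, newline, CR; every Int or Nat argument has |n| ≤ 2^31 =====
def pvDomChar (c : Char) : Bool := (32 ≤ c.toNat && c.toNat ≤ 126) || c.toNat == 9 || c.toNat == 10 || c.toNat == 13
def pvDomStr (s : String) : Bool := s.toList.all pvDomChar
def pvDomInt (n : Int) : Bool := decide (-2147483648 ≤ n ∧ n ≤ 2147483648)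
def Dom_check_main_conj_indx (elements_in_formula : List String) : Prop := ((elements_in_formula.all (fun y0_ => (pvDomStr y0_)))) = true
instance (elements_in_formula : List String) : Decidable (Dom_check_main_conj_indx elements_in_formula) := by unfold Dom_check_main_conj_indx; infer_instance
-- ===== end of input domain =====

-- B replaces A's per-index slice-and-count rescans by one pass keeping a running parenthesis
-- balance, with a no-connective early exit and the total-balance test hoisted out; objective: faster.

-- ===== PORT A =====
-- conj = ["^", ">", "v", "="] : four one-character strings; item[indx] is a single character,
-- so the membership test 'item[indx] in conj' is exactly char membership in these four chars.
def conjA : List Char := ['^', '>', 'v', '=']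

-- the big 'if' condition of A's inner loop, exactly as written (item[indx] via pyGet?, slices + count)
def condA (item : String) (indx : Int) : Bool :=
  (match PySem.Str.pyGet? item indx with
    | some ch => conjA.contains ch
    | none => false)
  && (((PySem.Str.count (PySem.Str.slice item none (some indx)) "(" : Int)
       - (PySem.Str.count (PySem.Str.slice item none (some indx)) ")" : Int)) == 0)
  && (((PySem.Str.count (PySem.Str.slice item (some indx) none) "(" : Int)
       - (PySem.Str.count (PySem.Str.slice item (some indx) none) ")" : Int)) == 0)

-- 'for indx in range(len(item)): … flag=True; break' + 'if flag: append(indx)':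
-- the appended value exists iff some index satisfies the condition, and is the first such index
def loopA (item : String) : List Int → Option Int
  | [] => none
  | i :: rest => if condA item i then some i else loopA item rest

def check_main_conj_indx (elements_in_formula : List String) : List Int :=
  elements_in_formula.foldl (fun indx_list item =>
    match loopA item (PySem.List.pyRange 0 (PySem.Str.len item)) with
    | some i => indx_list ++ [i]
    | none => indx_list) []

-- ===== PORT B =====
def conjB : List Char := ['^', '>', 'v', '=']

-- single pass: position and running paren balance; stop at first connective seen at balance 0
def scanB : List Char → Int → Int → Option Int
  | [], _, _ => none
  | c :: rest, pos, bal =>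
    if bal == 0 && conjB.contains c then some pos
    else scanB rest (pos + 1) (if c = '(' then bal + 1 else if c = ')' then bal - 1 else bal)

def check_main_conj_indx_alt (elements_in_formula : List String) : List Int :=
  elements_in_formula.foldl (fun indx_list item =>
    if !PySem.Str.isIn "^" item && !PySem.Str.isIn ">" item
       && !PySem.Str.isIn "v" item && !PySem.Str.isIn "=" item then indx_list
    else if PySem.Str.count item "(" ≠ PySem.Str.count item ")" then indx_list
    else
      match scanB item.toList 0 0 with
      | some i => indx_list ++ [i]
      | none => indx_list) []

-- ===== PRECONDITION & SPEC =====
def Spec_check_main_conj_indx (elements_in_formula : List String) (out : List Int) : Prop := out = check_main_conj_indx_alt elements_in_formula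
instance (elements_in_formula : List String) (out : List Int) : Decidable (Spec_check_main_conj_indx elements_in_formula out) := by unfold Spec_check_main_conj_indx; infer_instance

-- ===== CLAIM (what is proved, stated in full; the proofs are below) =====
def Claim_equal_check_main_conj_indx : Prop := ∀ (elements_in_formula : List String), Dom_check_main_conj_indx elements_in_formula → Spec_check_main_conj_indx elements_in_formula (check_main_conj_indx elements_in_formula)

-- ===== LEMMAS AND PROOFS =====

-- counting a one-character substring is counting that character
theorem count_go_singleton (c : Char) : ∀ (fuel : Nat) (l : List Char) (acc : Nat),
    l.length ≤ fuel → PySem.Chars.count.go [c] fuel l acc = acc + l.count c := by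
  intro fuel
  induction fuel with
  | zero =>
    intro l acc h
    have : l = [] := List.eq_nil_of_length_eq_zero (Nat.le_zero.mp h)
    subst this; simp [PySem.Chars.count.go]
  | succ n ih =>
    intro l acc h
    cases l with
    | nil => simp [PySem.Chars.count.go]
    | cons x t =>
      simp only [PySem.Chars.count.go]
      by_cases hx : x = c
      · subst hx
        simp only [List.isPrefixOf, BEq.rfl, Bool.true_and, if_pos]
        have := ih t (acc + 1) (by simpa using Nat.lt_succ_iff.mp (by simpa using h))
        simp only [List.length_singleton, List.drop_succ_cons, List.drop_zero]
        rw [this]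
        simp
        omega
      · have hpre : [c].isPrefixOf (x :: t) = false := by
          simp [List.isPrefixOf]
          exact fun hcx => absurd hcx.symm hx
        rw [hpre]
        simp only [Bool.false_eq_true, if_false]
        have := ih t acc (by simpa using Nat.lt_succ_iff.mp (by simpa using h))
        rw [this]
        simp [hx]

theorem count_singleton (l : List Char) (c : Char) :
    PySem.Chars.count l [c] = l.count c := by
  simp only [PySem.Chars.count, List.isEmpty_cons, Bool.false_eq_true, if_false]
  simpa using count_go_singleton c l.length l 0 le_rfl

-- parenthesis balance of a character list
def bal (s : List Char) : Int := (s.count '(' : Int) - (s.count ')' : Int)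

theorem bal_append (u v : List Char) : bal (u ++ v) = bal u + bal v := by
  simp [bal, List.count_append]; omega

theorem bal_push (p : List Char) (c : Char) :
    bal (p ++ [c]) = (if c = '(' then bal p + 1 else if c = ')' then bal p - 1 else bal p) := by
  rw [bal_append]
  have hb : bal [c] = (if c = '(' then 1 else if c = ')' then (-1 : Int) else 0) := by
    simp only [bal, List.count_singleton]
    split_ifs with h1 h2 <;> subst_eqs <;> simp_all [beq_iff_eq]
  rw [hb]; split_ifs <;> ring

-- condA at a natural index, phrased on item.toList
theorem condA_eq (item : String) (k : Nat) :
    condA item (k : Int) =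
      ((match item.toList[k]? with
        | some ch => conjA.contains ch
        | none => false)
       && (bal (item.toList.take k) == 0)
       && (bal (item.toList.drop k) == 0)) := by
  simp only [condA, PySem.Str.pyGet?_natCast]
  have h1 : (PySem.Str.slice item none (some (k : Int))).toList = item.toList.take k := by
    simp [PySem.Str.toList_slice, PySem.List.slice_to item.toList (Int.natCast_nonneg k)]
  have h2 : (PySem.Str.slice item (some (k : Int)) none).toList = item.toList.drop k := by
    simp [PySem.Str.toList_slice, PySem.List.slice_from item.toList (Int.natCast_nonneg k)]
  simp only [PySem.Str.count_eq, h1, h2]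
  have hl : ("(" : String).toList = ['('] := rfl
  have hr : (")" : String).toList = [')'] := rfl
  simp only [hl, hr, count_singleton, bal]

-- condA at the split point p ++ c :: t, under zero total balance
theorem condA_at (item : String) (p t : List Char) (c : Char)
    (hs : item.toList = p ++ c :: t) (htot : bal item.toList = 0) :
    condA item ((p.length : Nat) : Int) = ((bal p == 0) && conjB.contains c) := by
  rw [condA_eq, hs]
  have hget : (p ++ c :: t)[p.length]? = some c := by
    rw [List.getElem?_append_right le_rfl]; simp
  have htake : (p ++ c :: t).take p.length = p := by simp
  have hdrop : (p ++ c :: t).drop p.length = c :: t := by simp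
  rw [hget, htake, hdrop]
  have hsum : bal p + bal (c :: t) = 0 := by
    rw [← bal_append, ← hs]; exact htot
  by_cases hb : bal p = 0
  · have h2 : bal (c :: t) = 0 := by omega
    simp [hb, h2, conjA, conjB]
  · have hbf : (bal p == 0) = false := by simpa using hb
    simp [hbf]

-- empty ranges
theorem pyRange_nil (a b : Int) (h : b ≤ a) : PySem.List.pyRange a b = [] := by
  simp only [PySem.List.pyRange]
  rw [if_neg (by norm_num), if_pos (by norm_num : (0:Int) < 1), if_neg (by omega : ¬ a < b)]
  simp

-- main invariant: A's remaining index loop equals B's scan of the remaining suffix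
theorem loopA_eq_scanB (item : String) : ∀ (t p : List Char),
    item.toList = p ++ t → bal item.toList = 0 →
    loopA item (PySem.List.pyRange (p.length : Int) (item.toList.length : Int))
      = scanB t (p.length : Int) (bal p) := by
  intro t
  induction t with
  | nil =>
    intro p hs _
    rw [pyRange_nil _ _ (by simp [hs])]
    simp [loopA, scanB]
  | cons c t' ih =>
    intro p hs htot
    have hlen : (p.length : Int) < (item.toList.length : Int) := by
      rw [hs]; simp
    rw [PySem.List.pyRange_one_cons hlen]
    have hs' : item.toList = (p ++ [c]) ++ t' := by rw [hs]; simp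
    have harm := ih (p ++ [c]) hs' htot
    rw [bal_push] at harm
    simp only [List.length_append, List.length_singleton] at harm
    push_cast at harm
    simp only [loopA, scanB, condA_at item p t' c hs htot, harm]

-- A's loop returns nothing once its condition fails at every natural index
theorem loopA_none_of (item : String) (hfalse : ∀ k : Nat, condA item (k : Int) = false) :
    ∀ (l : List Int), (∀ i ∈ l, ∃ k : Nat, i = (k : Int)) → loopA item l = none := by
  intro l
  induction l with
  | nil => intro _; simp [loopA]
  | cons i rest ih =>
    intro hnat
    obtain ⟨k, hk⟩ := hnat i (by simp)
    simp only [loopA, hk, hfalse k, Bool.false_eq_true, if_false]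
    exact ih (fun j hj => hnat j (by simp [hj]))

-- if the whole string is unbalanced no index satisfies A's condition
theorem condA_false_of_unbal (item : String) (htot : bal item.toList ≠ 0) :
    ∀ k : Nat, condA item (k : Int) = false := by
  intro k
  rw [condA_eq]
  have hsum : bal (item.toList.take k) + bal (item.toList.drop k) = bal item.toList := by
    rw [← bal_append, List.take_append_drop]
  by_cases h1 : bal (item.toList.take k) = 0
  · have h2 : (bal (item.toList.drop k) == 0) = false := by
      simpa using (by omega : bal (item.toList.drop k) ≠ 0)
    simp [h2]
  · have h2 : (bal (item.toList.take k) == 0) = false := by simpa using h1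
    simp [h2]

-- if no connective character occurs in the string, A's condition fails at every index
theorem condA_false_of_noconj (item : String)
    (hno : ∀ c ∈ conjA, c ∉ item.toList) :
    ∀ k : Nat, condA item (k : Int) = false := by
  intro k
  rw [condA_eq]
  cases hg : item.toList[k]? with
  | none => simp
  | some ch =>
    have hmem : ch ∈ item.toList := List.mem_of_getElem? hg
    have hnot : ch ∉ conjA := fun hc => hno ch hc hmem
    simp [hnot]

-- '^' in item (etc.) decides whether the connective character occurs
theorem isIn_singleton_char (c : Char) (cs : String) (item : String)
    (hcs : cs.toList = [c]) (h : PySem.Str.isIn cs item = false) : c ∉ item.toList := by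
  intro hmem
  have : cs.toList <:+: item.toList := by
    rw [hcs]
    obtain ⟨u, v, huv⟩ := List.mem_iff_append.mp hmem
    rw [huv]
    exact ⟨u, v, by simp⟩
  rw [← PySem.Str.isIn_iff_infix] at this
  rw [h] at this
  exact Bool.false_ne_true this

-- every index A's loop visits is a natural number
theorem pyRange_nat (item : String) :
    ∀ i ∈ PySem.List.pyRange 0 (PySem.Str.len item), ∃ k : Nat, i = (k : Int) := by
  intro i hi
  rw [PySem.Str.len_eq] at hi
  have := (PySem.List.mem_pyRange_one).mp hi
  exact ⟨i.toNat, by omega⟩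

-- if no connective occurs, A's inner loop finds nothing
theorem item_none_of_noconj (item : String)
    (hg : (!PySem.Str.isIn "^" item && !PySem.Str.isIn ">" item
           && !PySem.Str.isIn "v" item && !PySem.Str.isIn "=" item) = true) :
    loopA item (PySem.List.pyRange 0 (PySem.Str.len item)) = none := by
  simp only [Bool.and_eq_true, Bool.not_eq_true'] at hg
  obtain ⟨⟨⟨h1, h2⟩, h3⟩, h4⟩ := hg
  apply loopA_none_of item _ _ (pyRange_nat item)
  apply condA_false_of_noconj
  intro c hc
  simp only [conjA, List.mem_cons, List.not_mem_nil, or_false] at hc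
  rcases hc with rfl | rfl | rfl | rfl
  · exact isIn_singleton_char _ _ _ rfl h1
  · exact isIn_singleton_char _ _ _ rfl h2
  · exact isIn_singleton_char _ _ _ rfl h3
  · exact isIn_singleton_char _ _ _ rfl h4

-- the per-item results of A's inner loop and B's guarded scan coincide
theorem item_eq (item : String) :
    loopA item (PySem.List.pyRange 0 (PySem.Str.len item))
      = (if PySem.Str.count item "(" ≠ PySem.Str.count item ")" then none
         else scanB item.toList 0 0) := by
  have hcnt : (PySem.Str.count item "(" : Int) - (PySem.Str.count item ")" : Int) = bal item.toList := by
    have hl : ("(" : String).toList = ['('] := rfl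
    have hr : (")" : String).toList = [')'] := rfl
    simp only [PySem.Str.count_eq, hl, hr, count_singleton, bal]
  by_cases htot : bal item.toList = 0
  · have hne : ¬ PySem.Str.count item "(" ≠ PySem.Str.count item ")" := by
      simp only [not_not]; omega
    rw [if_neg hne]
    have := loopA_eq_scanB item item.toList [] rfl htot
    simp only [List.length_nil, Nat.cast_zero] at this
    rw [PySem.Str.len_eq]
    rw [this]
    simp [bal]
  · have hne : PySem.Str.count item "(" ≠ PySem.Str.count item ")" := by
      intro h; apply htot; omega
    rw [if_pos hne]
    exact loopA_none_of item (condA_false_of_unbal item htot) _ (pyRange_nat item)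

theorem fold_eq : ∀ (xs : List String) (acc : List Int),
    List.foldl (fun indx_list item =>
      match loopA item (PySem.List.pyRange 0 (PySem.Str.len item)) with
      | some i => indx_list ++ [i]
      | none => indx_list) acc xs
    = List.foldl (fun indx_list item =>
      if !PySem.Str.isIn "^" item && !PySem.Str.isIn ">" item
         && !PySem.Str.isIn "v" item && !PySem.Str.isIn "=" item then indx_list
      else if PySem.Str.count item "(" ≠ PySem.Str.count item ")" then indx_list
      else
        match scanB item.toList 0 0 with
        | some i => indx_list ++ [i]
        | none => indx_list) acc xs := by
  intro xs
  induction xs with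
  | nil => intro acc; rfl
  | cons item rest ih =>
    intro acc
    simp only [List.foldl_cons]
    rw [ih]
    congr 1
    by_cases hg : (!PySem.Str.isIn "^" item && !PySem.Str.isIn ">" item
                   && !PySem.Str.isIn "v" item && !PySem.Str.isIn "=" item) = true
    · rw [item_none_of_noconj item hg, if_pos hg]
    · rw [if_neg hg, item_eq]
      by_cases h : PySem.Str.count item "(" ≠ PySem.Str.count item ")"
      · rw [if_pos h, if_pos h]
      · rw [if_neg h, if_neg h]

-- ===== VERDICT (by name: the statement is the Claim_ definition above) =====
theorem check_main_conj_indx_spec : Claim_equal_check_main_conj_indx := by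
  intro xs _
  unfold Spec_check_main_conj_indx check_main_conj_indx check_main_conj_indx_alt
  exact fold_eq xs []
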